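-- pv_equiv track=rewrite | github.com/ivanillera/TP1Sintaxis | Lexer.py | a_true
-- ===== SOURCE A (Python) =====
-- TRAMPA = -1
--
-- RESULTADO_ACEPTADO = "ACEPTADO"
--
-- RESULTADO_TRAMPA = "TRAMPA"
--
-- RESULTADO_NO_ACEPTADO = "NO_ACEPTADO"
--
-- def d_true(estado_anterior, caracter):
-- 	if estado_anterior == 0 and caracter == "t":
-- 		return 1
-- 	if estado_anterior == 1 and caracter == "r":
-- 		return 2
-- 	if estado_anterior == 2 and caracter == "u":
-- 		return 3
-- 	if estado_anterior == 3 and caracter == "e":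
-- 		return 4
--
--
-- 	return RESULTADO_TRAMPA
--
-- def a_true(cadena):
-- 	Finales = [4]
-- 	estado_actual = 0
--
-- 	for caracter in cadena:
-- 		estado_proximo = d_true(estado_actual, caracter)
-- 		if estado_proximo == TRAMPA:
-- 			return RESULTADO_TRAMPA
-- 		estado_actual = estado_proximo
--
-- 	if estado_actual in Finales:
-- 		return RESULTADO_ACEPTADO
-- 	else:
-- 		return RESULTADO_NO_ACEPTADO
-- ===== SOURCE B (Python) =====
-- TRAMPA = -1
-- RESULTADO_ACEPTADO = "ACEPTADO"
-- RESULTADO_TRAMPA = "TRAMPA"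
-- RESULTADO_NO_ACEPTADO = "NO_ACEPTADO"
--
-- def a_true(cadena):
--     # Materialize the whole input (full consumption, like A's loop),
--     # then one closed-form comparison instead of a state machine.
--     if list(cadena) == ['t', 'r', 'u', 'e']:
--         return RESULTADO_ACEPTADO
--     return RESULTADO_NO_ACEPTADO
-- ===== Notes on version B (the rewrite author's own statement) =====
-- stated objective: simpler
-- what changed: Replaces the per-character DFA scan (whose trap branch compares a string against the int -1 and so never fires) with a single closed-form comparison of the materialized input against ['t','r','u','e'].
import Mathlib
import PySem

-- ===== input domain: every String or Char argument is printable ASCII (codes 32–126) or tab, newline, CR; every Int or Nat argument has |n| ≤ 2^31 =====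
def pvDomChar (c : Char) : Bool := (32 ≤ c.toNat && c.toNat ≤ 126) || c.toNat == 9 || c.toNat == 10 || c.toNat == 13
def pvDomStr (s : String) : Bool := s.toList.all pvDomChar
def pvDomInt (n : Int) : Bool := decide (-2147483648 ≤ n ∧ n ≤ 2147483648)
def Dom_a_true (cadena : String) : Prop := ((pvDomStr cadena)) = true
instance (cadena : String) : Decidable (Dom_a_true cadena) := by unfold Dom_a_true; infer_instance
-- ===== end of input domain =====

-- B replaces A's per-character DFA scan with one closed-form list comparison (objective: simpler).
-- Note: A's trap check compares `estado_proximo == TRAMPA` (int -1) against d_true's STRING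
-- return "TRAMPA", so it never fires; the state is modelled as `Option Int` (none = the string
-- "TRAMPA" sitting in the state variable), keeping the port step-for-step faithful.

-- ===== PORT A =====
-- d_true: returns a state number, or the STRING "TRAMPA" (here: none)
def dTrue (estado_anterior : Option Int) (caracter : Char) : Option Int :=
  if estado_anterior = some 0 ∧ caracter = 't' then some 1
  else if estado_anterior = some 1 ∧ caracter = 'r' then some 2
  else if estado_anterior = some 2 ∧ caracter = 'u' then some 3
  else if estado_anterior = some 3 ∧ caracter = 'e' then some 4
  else none

-- the for-loop with its early return (the `some (-1)` comparison mirrors `estado_proximo == TRAMPA`)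
def aTrueLoop (estado_actual : Option Int) : List Char → String
  | [] => if estado_actual = some 4 then "ACEPTADO" else "NO_ACEPTADO"
  | c :: cs =>
    let estado_proximo := dTrue estado_actual c
    if estado_proximo = some (-1) then "TRAMPA" else aTrueLoop estado_proximo cs

def a_true (cadena : String) : String := aTrueLoop (some 0) cadena.toList

-- ===== PORT B =====
def a_true_alt (cadena : String) : String :=
  if cadena.toList = ['t', 'r', 'u', 'e'] then "ACEPTADO" else "NO_ACEPTADO"

-- ===== PRECONDITION & SPEC =====
def Spec_a_true (cadena : String) (out : String) : Prop := out = a_true_alt cadena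
instance (cadena : String) (out : String) : Decidable (Spec_a_true cadena out) := by unfold Spec_a_true; infer_instance

-- ===== CLAIM (what is proved, stated in full; the proofs are below) =====
def Claim_equal_a_true : Prop := ∀ (cadena : String), Dom_a_true cadena → Spec_a_true cadena (a_true cadena)

-- ===== LEMMAS AND PROOFS =====

theorem loop_none (l : List Char) : aTrueLoop none l = "NO_ACEPTADO" := by
  induction l with
  | nil => rfl
  | cons c cs ih => simpa [aTrueLoop, dTrue] using ih

theorem loop_st4 (l : List Char) :
    aTrueLoop (some 4) l = if l = [] then "ACEPTADO" else "NO_ACEPTADO" := by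
  cases l with
  | nil => rfl
  | cons c cs => simp [aTrueLoop, dTrue, loop_none]

theorem loop_st3 (l : List Char) :
    aTrueLoop (some 3) l = if l = ['e'] then "ACEPTADO" else "NO_ACEPTADO" := by
  cases l with
  | nil => rfl
  | cons c cs =>
    by_cases hc : c = 'e'
    · subst hc; simp [aTrueLoop, dTrue, loop_st4]
    · simp [aTrueLoop, dTrue, hc, loop_none]

theorem loop_st2 (l : List Char) :
    aTrueLoop (some 2) l = if l = ['u', 'e'] then "ACEPTADO" else "NO_ACEPTADO" := by
  cases l with
  | nil => rfl
  | cons c cs =>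
    by_cases hc : c = 'u'
    · subst hc; simp [aTrueLoop, dTrue, loop_st3]
    · simp [aTrueLoop, dTrue, hc, loop_none]

theorem loop_st1 (l : List Char) :
    aTrueLoop (some 1) l = if l = ['r', 'u', 'e'] then "ACEPTADO" else "NO_ACEPTADO" := by
  cases l with
  | nil => rfl
  | cons c cs =>
    by_cases hc : c = 'r'
    · subst hc; simp [aTrueLoop, dTrue, loop_st2]
    · simp [aTrueLoop, dTrue, hc, loop_none]

theorem loop_st0 (l : List Char) :
    aTrueLoop (some 0) l = if l = ['t', 'r', 'u', 'e'] then "ACEPTADO" else "NO_ACEPTADO" := by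
  cases l with
  | nil => rfl
  | cons c cs =>
    by_cases hc : c = 't'
    · subst hc; simp [aTrueLoop, dTrue, loop_st1]
    · simp [aTrueLoop, dTrue, hc, loop_none]

-- ===== VERDICT (by name: the statement is the Claim_ definition above) =====
theorem a_true_spec : Claim_equal_a_true := by
  intro cadena _
  unfold Spec_a_true a_true a_true_alt
  exact loop_st0 cadena.toList
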